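-- pv_equiv track=rewrite | github.com/clemto94/revision_python | gener.py | count_replace
-- ===== SOURCE A (Python) =====
-- def count_replace(ex: str):
--     count = 0
--     enter = 0
--     end = 0
--     for s in ex:
--         if s == '<':
--             count += 1
--             enter += 1
--         if s == '>':
--             count -= 1
--             end += 1
--     return count, enter, end
-- ===== SOURCE B (Python) =====
-- def count_replace(ex: str):
--     enter = ex.count('<')
--     end = ex.count('>')
--     return enter - end, enter, end
-- ===== Notes on version B (the rewrite author's own statement) =====
-- stated objective: faster
-- what changed: Replaces the explicit per-character loop with triple accumulator by two str.count library calls (C-level scans) and an algebraic subtraction for the net count.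
import Mathlib
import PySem

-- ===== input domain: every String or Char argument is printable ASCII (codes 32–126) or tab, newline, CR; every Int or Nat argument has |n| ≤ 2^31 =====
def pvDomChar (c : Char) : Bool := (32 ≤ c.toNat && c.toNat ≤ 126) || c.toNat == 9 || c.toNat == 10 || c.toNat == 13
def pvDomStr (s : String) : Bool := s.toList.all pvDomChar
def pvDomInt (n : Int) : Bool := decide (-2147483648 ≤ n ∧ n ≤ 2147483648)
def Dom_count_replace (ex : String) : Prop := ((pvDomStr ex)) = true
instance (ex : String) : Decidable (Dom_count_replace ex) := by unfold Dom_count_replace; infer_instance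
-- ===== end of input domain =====

-- B replaces A's explicit character loop by two str.count calls plus a subtraction (idiomatic decomposition).

-- ===== PORT A =====
-- the loop body: state (count, enter, end), branches in source order
def stepA (st : Int × Int × Int) (s : Char) : Int × Int × Int :=
  let st := if s == '<' then (st.1 + 1, st.2.1 + 1, st.2.2) else st
  if s == '>' then (st.1 - 1, st.2.1, st.2.2 + 1) else st

def count_replace (ex : String) : Int × Int × Int :=
  let st := ex.toList.foldl stepA (0, 0, 0)
  (st.1, st.2.1, st.2.2)

-- ===== PORT B =====
def count_replace_alt (ex : String) : Int × Int × Int :=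
  let enter : Int := PySem.Str.count ex "<"
  let «end» : Int := PySem.Str.count ex ">"
  (enter - «end», enter, «end»)

-- ===== PRECONDITION & SPEC =====
def Spec_count_replace (ex : String) (out : Int × Int × Int) : Prop := out = count_replace_alt ex
instance (ex : String) (out : Int × Int × Int) : Decidable (Spec_count_replace ex out) := by unfold Spec_count_replace; infer_instance

-- ===== CLAIM (what is proved, stated in full; the proofs are below) =====
def Claim_equal_count_replace : Prop := ∀ (ex : String), Dom_count_replace ex → Spec_count_replace ex (count_replace ex)

-- ===== LEMMAS AND PROOFS =====

-- str.count with a single-character needle is List.count on the characters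
theorem chars_count_go_singleton (c : Char) (l : List Char) (fuel acc : Nat)
    (h : l.length ≤ fuel) :
    PySem.Chars.count.go [c] fuel l acc = acc + l.count c := by
  induction l generalizing fuel acc with
  | nil => cases fuel <;> simp [PySem.Chars.count.go]
  | cons x t ih =>
    cases fuel with
    | zero => simp at h
    | succ n =>
      simp only [List.length_cons, Nat.succ_le_succ_iff] at h
      by_cases hx : x = c
      · subst hx
        simp [PySem.Chars.count.go, List.isPrefixOf, ih _ _ h]
        omega
      · simp [PySem.Chars.count.go, List.isPrefixOf, hx, ih _ _ h,
          Ne.symm hx]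

theorem chars_count_singleton (c : Char) (l : List Char) :
    PySem.Chars.count l [c] = l.count c := by
  simp [PySem.Chars.count, chars_count_go_singleton c l l.length 0 le_rfl]

-- A's loop invariant: the fold adds the two character counts to the accumulator
theorem loop_invariant (l : List Char) (a b d : Int) :
    l.foldl stepA (a, b, d)
    = (a + l.count '<' - l.count '>', b + l.count '<', d + l.count '>') := by
  induction l generalizing a b d with
  | nil => simp
  | cons x t ih =>
    rw [List.foldl_cons]
    by_cases h1 : x = '<'
    · subst h1
      rw [show stepA (a, b, d) '<' = (a + 1, b + 1, d) from by simp [stepA], ih]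
      simp [Prod.ext_iff]
      omega
    · by_cases h2 : x = '>'
      · subst h2
        rw [show stepA (a, b, d) '>' = (a - 1, b, d + 1) from by simp [stepA], ih]
        simp [Prod.ext_iff]
        omega
      · rw [show stepA (a, b, d) x = (a, b, d) from by simp [stepA, h1, h2], ih]
        simp [h1, h2]

-- ===== VERDICT (by name: the statement is the Claim_ definition above) =====
theorem count_replace_spec : Claim_equal_count_replace := by
  intro ex _
  show _ = _
  simp [count_replace, count_replace_alt, loop_invariant, PySem.Str.count,
    chars_count_singleton]
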